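-- pv_equiv track=rewrite | github.com/Oslomayor/Python-Review | 出现1次的数字的和.py | new_sum1
-- ===== SOURCE A (Python) =====
-- def new_sum1(nums):
--     buffer=[]
--     s = 0
--     for num in nums:
--         if num in buffer:
--             s -= num
--         else:
--             s += num
--             buffer.append(num)
--     return s
-- ===== SOURCE B (Python) =====
-- def new_sum1(nums):
--     return 2 * sum(set(nums)) - sum(nums)
-- ===== Notes on version B (the rewrite author's own statement) =====
-- stated objective: simpler
-- what changed: Replaces the per-element membership loop with a quadratic list buffer by the closed form 2*sum(set(nums)) - sum(nums), using that each value contributes num*(2 - count-weight) so only the distinct-sum and total sum are needed.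
import Mathlib
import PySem

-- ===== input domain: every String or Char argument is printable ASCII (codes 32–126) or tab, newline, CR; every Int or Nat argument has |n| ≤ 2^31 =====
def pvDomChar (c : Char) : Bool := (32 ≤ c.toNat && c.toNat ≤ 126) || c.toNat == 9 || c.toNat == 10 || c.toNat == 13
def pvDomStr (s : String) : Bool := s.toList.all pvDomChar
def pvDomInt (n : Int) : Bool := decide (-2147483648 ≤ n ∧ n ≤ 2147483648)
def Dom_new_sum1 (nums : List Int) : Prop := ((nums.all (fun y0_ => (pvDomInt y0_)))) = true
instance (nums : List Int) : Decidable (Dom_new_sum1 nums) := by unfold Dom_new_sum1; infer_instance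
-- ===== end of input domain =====

-- B replaces A's membership-test loop (quadratic list buffer) by the closed form
-- 2*sum(set(nums)) - sum(nums); objective: simpler (and asymptotically faster).

-- ===== PORT A =====
-- step of A's loop: state is (buffer, s)
def new_sum1Step (st : List Int × Int) (num : Int) : List Int × Int :=
  if num ∈ st.1 then (st.1, st.2 - num) else (st.1 ++ [num], st.2 + num)

def new_sum1 (nums : List Int) : Int :=
  (nums.foldl new_sum1Step ([], 0)).2

-- ===== PORT B =====
def new_sum1_alt (nums : List Int) : Int :=
  2 * (PySem.Set.ofList nums).sum - nums.sum

-- ===== PRECONDITION & SPEC =====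
def Spec_new_sum1 (nums : List Int) (out : Int) : Prop := out = new_sum1_alt nums
instance (nums : List Int) (out : Int) : Decidable (Spec_new_sum1 nums out) := by unfold Spec_new_sum1; infer_instance

-- ===== CLAIM (what is proved, stated in full; the proofs are below) =====
def Claim_equal_new_sum1 : Prop := ∀ (nums : List Int), Dom_new_sum1 nums → Spec_new_sum1 nums (new_sum1 nums)

-- ===== LEMMAS AND PROOFS =====

theorem new_sum1_loop_eq (nums : List Int) : ∀ (buf : List Int) (s : Int),
    (nums.foldl new_sum1Step (buf, s)).2
      = s + 2 * ((PySem.Set.update buf nums).sum - buf.sum) - nums.sum := by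
  induction nums with
  | nil => intro buf s; simp [PySem.Set.update]
  | cons x xs ih =>
    intro buf s
    by_cases hx : x ∈ buf
    · have hupd : PySem.Set.update buf (x :: xs) = PySem.Set.update buf xs := by
        rw [PySem.Set.update_cons, PySem.Set.add_of_mem hx]
      rw [List.foldl_cons, show new_sum1Step (buf, s) x = (buf, s - x) by
        simp [new_sum1Step, hx]]
      rw [ih buf (s - x), hupd, List.sum_cons]
      ring
    · have hupd : PySem.Set.update buf (x :: xs) = PySem.Set.update (buf ++ [x]) xs := by
        rw [PySem.Set.update_cons, PySem.Set.add_of_not_mem hx]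
      rw [List.foldl_cons, show new_sum1Step (buf, s) x = (buf ++ [x], s + x) by
        simp [new_sum1Step, hx]]
      rw [ih (buf ++ [x]) (s + x), hupd, List.sum_cons, List.sum_append, List.sum_cons]
      simp only [List.sum_nil]
      ring

-- ===== VERDICT (by name: the statement is the Claim_ definition above) =====
theorem new_sum1_spec : Claim_equal_new_sum1 := by
  intro nums _
  unfold Spec_new_sum1 new_sum1 new_sum1_alt
  rw [new_sum1_loop_eq nums [] 0, ← PySem.Set.update_nil_left]
  simp only [List.sum_nil]
  ring
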